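-- pv_equiv track=rewrite | github.com/pkarstaedt/overengineered-multitarget-transcription-suite | client/overmultiasrsuite.py | _join_chunks
-- ===== SOURCE A (Python) =====
-- def _join_chunks(texts: list[str]) -> str:
--     """Join VAD chunk transcriptions into a single string.
--
--     Parakeet adds terminal punctuation to every chunk it sees as a complete
--     sentence.  When the VAD cuts mid-sentence the result looks like:
--         "I was trying to explain. something important."
--     Heuristic: if chunk[N] ends with '.' and chunk[N+1] starts with a
--     lowercase letter, the period was added by the model at an artificial
--     boundary — strip it so the joined text reads naturally.
--     Other punctuation (! ? , ; :) is never stripped automatically.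
--     """
--     cleaned: list[str] = []
--     for i, text in enumerate(texts):
--         text = text.strip()
--         if not text:
--             continue
--         # Look ahead: if the next non-empty chunk starts with lowercase,
--         # this chunk's trailing period is likely spurious.
--         if text.endswith("."):
--             next_text = next((t.strip() for t in texts[i + 1:] if t.strip()), "")
--             if next_text and next_text[0].islower():
--                 text = text[:-1]  # drop the period
--         cleaned.append(text)
--     return " ".join(cleaned)
-- ===== SOURCE B (Python) =====
-- def _join_chunks(texts: list[str]) -> str:
--     """Reverse pass: track the first character of the next non-empty
--     stripped chunk instead of scanning ahead for it each time."""
--     cleaned: list[str] = []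
--     nxt = ""  # first char of the next (to the right) non-empty stripped chunk
--     for text in reversed(texts):
--         t = text.strip()
--         if not t:
--             continue
--         c0 = t[0]
--         if t.endswith(".") and nxt and nxt.islower():
--             t = t[:-1]
--         cleaned.append(t)
--         nxt = c0
--     return " ".join(reversed(cleaned))
-- ===== Notes on version B (the rewrite author's own statement) =====
-- stated objective: alternative
-- what changed: Replaced A's per-chunk forward scan for the next non-empty stripped chunk (a generator over texts[i+1:] at each period-ending chunk) with a single reverse pass that carries the next non-empty stripped chunk's first character in an accumulator.
import Mathlib
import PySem

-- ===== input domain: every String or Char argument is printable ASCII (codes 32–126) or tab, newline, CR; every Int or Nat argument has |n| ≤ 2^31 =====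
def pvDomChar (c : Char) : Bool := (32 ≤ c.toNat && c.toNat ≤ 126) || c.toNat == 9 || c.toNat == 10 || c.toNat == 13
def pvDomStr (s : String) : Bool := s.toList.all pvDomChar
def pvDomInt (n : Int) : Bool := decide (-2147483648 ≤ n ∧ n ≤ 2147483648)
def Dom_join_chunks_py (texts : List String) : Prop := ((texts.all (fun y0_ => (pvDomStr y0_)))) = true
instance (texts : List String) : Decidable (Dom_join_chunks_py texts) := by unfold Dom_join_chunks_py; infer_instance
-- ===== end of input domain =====

-- B replaces A's forward look-ahead (a scan of texts[i+1:] at each period-ending chunk) by one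
-- reverse pass that carries the next non-empty stripped chunk's first character (alternative).

-- ===== PORT A =====
-- next((t.strip() for t in rest if t.strip()), "") : first non-empty stripped string in rest
def pvNextNonempty : List String → String
  | [] => ""
  | t :: r => let s := PySem.Str.strip t; if s = "" then pvNextNonempty r else s

-- 'nt and nt[0].islower()' — nt nonempty and its first char lowercase
-- (char islower via PySem.Chars.islower; exact on the printable-ASCII domain)
def pvLowerHead (nt : String) : Bool :=
  match PySem.Str.pyGet? nt 0 with
  | some c => PySem.Chars.islower c
  | none => false

-- the loop of A: texts[i+1:] is exactly the tail at position i, so structural recursion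
def pvCleanA : List String → List String
  | [] => []
  | x :: rest =>
    let t := PySem.Str.strip x
    if t = "" then pvCleanA rest
    else
      let t' := if PySem.Str.endswith t "." then
                  (if pvLowerHead (pvNextNonempty rest)
                   then PySem.Str.slice t none (some (-1))  -- text[:-1]
                   else t)
                else t
      t' :: pvCleanA rest

def join_chunks_py (texts : List String) : String :=
  PySem.Str.join " " (pvCleanA texts)

-- ===== PORT B =====
-- one step of B's loop body; state = (cleaned list built in reverse order, nxt = t[0] of the
-- last non-empty stripped chunk seen, i.e. the next one to the right; none encodes nxt == "")
def pvStepB (acc : List String × Option Char) (text : String) : List String × Option Char :=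
  let t := PySem.Str.strip text
  if t = "" then acc
  else
    let c0 := PySem.Str.pyGet? t 0           -- c0 = t[0]
    let t' := if PySem.Str.endswith t "." &&
                 (match acc.2 with | some c => PySem.Chars.islower c | none => false)
              then PySem.Str.slice t none (some (-1))  -- t[:-1]
              else t
    (acc.1 ++ [t'], c0)

def join_chunks_py_alt (texts : List String) : String :=
  let r := texts.reverse.foldl pvStepB ([], none)   -- for text in reversed(texts)
  PySem.Str.join " " r.1.reverse                    -- " ".join(reversed(cleaned))

-- ===== PRECONDITION & SPEC =====
def Spec_join_chunks_py (texts : List String) (out : String) : Prop := out = join_chunks_py_alt texts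
instance (texts : List String) (out : String) : Decidable (Spec_join_chunks_py texts out) := by unfold Spec_join_chunks_py; infer_instance

-- ===== CLAIM (what is proved, stated in full; the proofs are below) =====
def Claim_equal_join_chunks_py : Prop := ∀ (texts : List String), Dom_join_chunks_py texts → Spec_join_chunks_py texts (join_chunks_py texts)

-- ===== LEMMAS AND PROOFS =====

-- pvLowerHead is definitionally B's match on the looked-up head character
lemma pvLowerHead_def (nt : String) :
    (match PySem.Str.pyGet? nt 0 with | some c => PySem.Chars.islower c | none => false)
      = pvLowerHead nt := rfl

-- invariant of B's loop: the reverse-order list is A's cleaned list reversed, and the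
-- carried char is the head of the next non-empty stripped chunk A scans ahead for
lemma pvFold_spec (texts : List String) :
    texts.foldr (fun x y => pvStepB y x) ([], none)
      = ((pvCleanA texts).reverse, PySem.Str.pyGet? (pvNextNonempty texts) 0) := by
  induction texts with
  | nil => rfl
  | cons x rest ih =>
    rw [List.foldr_cons, ih]
    simp only [pvStepB, pvCleanA, pvNextNonempty]
    by_cases h : PySem.Str.strip x = ""
    · simp [h]
    · simp only [h, if_false, pvLowerHead_def]
      by_cases he : PySem.Chars.endswith (PySem.Chars.strip x.toList) ['.'] = true <;>
        by_cases hl : pvLowerHead (pvNextNonempty rest) = true <;> simp [he, hl]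

-- ===== VERDICT (by name: the statement is the Claim_ definition above) =====
theorem join_chunks_py_spec : Claim_equal_join_chunks_py := by
  intro texts _
  show join_chunks_py texts = join_chunks_py_alt texts
  unfold join_chunks_py join_chunks_py_alt
  rw [List.foldl_reverse]
  simp [pvFold_spec]
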